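-- pv_equiv track=rewrite | github.com/taylorparsons/athena-skill | skills/athena/scripts/progress_schema.py | _section_bullets
-- ===== SOURCE A (Python) =====
-- SECTION_HEADERS = ["DONE", "IN PROGRESS", "NEXT", "NOTES"]
--
-- def _find_section_indices(lines: list[str], section: str) -> list[int]:
--     return [idx for idx, line in enumerate(lines) if line.strip() == section]
--
-- def _section_bounds(lines: list[str], section: str) -> tuple[int, int] | None:
--     section_indices = _find_section_indices(lines, section)
--     if len(section_indices) != 1:
--         return None
--
--     start = section_indices[0]
--     end = len(lines)
--     for other in SECTION_HEADERS:
--         if other == section: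
--             continue
--         for idx in _find_section_indices(lines, other):
--             if idx > start:
--                 end = min(end, idx)
--     return start, end
--
-- def _section_bullets(lines: list[str], section: str) -> list[str]:
--     bounds = _section_bounds(lines, section)
--     if bounds is None:
--         return []
--
--     start, end = bounds
--     bullets: list[str] = []
--     for raw in lines[start + 1 : end]:
--         stripped = raw.strip()
--         if not stripped:
--             continue
--         if stripped.startswith("-"):
--             bullets.append(stripped)
--     return bullets
-- ===== SOURCE B (Python) =====
-- SECTION_HEADERS = ["DONE", "IN PROGRESS", "NEXT", "NOTES"]
--
-- def _section_bullets(lines: list[str], section: str) -> list[str]: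
--     count = 0
--     start = 0
--     for idx, line in enumerate(lines):
--         if line.strip() == section:
--             count += 1
--             start = idx
--     if count != 1:
--         return []
--     bullets = []
--     for raw in lines[start + 1:]:
--         stripped = raw.strip()
--         if stripped in SECTION_HEADERS:
--             break
--         if stripped.startswith("-"):
--             bullets.append(stripped)
--     return bullets
-- ===== Notes on version B (the rewrite author's own statement) =====
-- stated objective: simpler
-- what changed: B replaces A's index-list building, per-header min-over-indices bound computation and slicing with a single counting pass to find the unique section line plus one forward scan that breaks at the first other section header.
import Mathlib
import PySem

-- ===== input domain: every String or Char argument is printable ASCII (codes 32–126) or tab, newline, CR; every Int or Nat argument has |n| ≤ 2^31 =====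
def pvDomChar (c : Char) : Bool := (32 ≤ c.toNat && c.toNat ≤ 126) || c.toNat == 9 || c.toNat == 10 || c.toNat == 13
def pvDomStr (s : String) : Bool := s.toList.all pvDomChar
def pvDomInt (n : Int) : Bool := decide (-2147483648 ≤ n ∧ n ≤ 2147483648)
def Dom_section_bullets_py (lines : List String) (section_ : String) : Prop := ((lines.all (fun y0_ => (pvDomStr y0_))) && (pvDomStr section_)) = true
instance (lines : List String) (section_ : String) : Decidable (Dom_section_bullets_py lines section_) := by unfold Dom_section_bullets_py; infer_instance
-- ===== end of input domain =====

-- B replaces A's index-list / min-over-headers / slice machinery by one counting pass plus one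
-- forward scan that stops at the first other section header (objective: simpler).

-- ===== PORT A =====
def pvHeaders : List String := ["DONE", "IN PROGRESS", "NEXT", "NOTES"]

-- [idx for idx, line in enumerate(lines) if line.strip() == section]
def pvFindSectionIndices (lines : List String) (section_ : String) : List Int :=
  (PySem.List.enumerate lines 0).filterMap
    (fun p => if PySem.Str.strip p.2 = section_ then some p.1 else none)

-- _section_bounds: None unless exactly one index; end = min over later indices of other headers
def pvSectionBounds (lines : List String) (section_ : String) : Option (Int × Int) :=
  match pvFindSectionIndices lines section_ with
  | [start] =>
      let e := pvHeaders.foldl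
        (fun e other =>
          if other = section_ then e
          else (pvFindSectionIndices lines other).foldl
            (fun e idx => if start < idx then min e idx else e) e)
        (lines.length : Int)
      some (start, e)
  | _ => none

def section_bullets_py (lines : List String) (section_ : String) : List String :=
  match pvSectionBounds lines section_ with
  | none => []
  | some (start, e) =>
      (PySem.List.slice lines (some (start + 1)) (some e)).foldl
        (fun acc raw =>
          let stripped := PySem.Str.strip raw
          if stripped = "" then acc
          else if PySem.Str.startswith stripped "-" then acc ++ [stripped] else acc) []

-- ===== PORT B =====
-- the forward scan of Source B: stop at the first section header, collect "-" bullets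
def pvBLoop : List String → List String → List String
  | [], acc => acc
  | raw :: rest, acc =>
      let stripped := PySem.Str.strip raw
      if stripped ∈ pvHeaders then acc
      else pvBLoop rest (if PySem.Str.startswith stripped "-" then acc ++ [stripped] else acc)

def section_bullets_py_alt (lines : List String) (section_ : String) : List String :=
  let cs := (PySem.List.enumerate lines 0).foldl
    (fun (cs : Int × Int) p => if PySem.Str.strip p.2 = section_ then (cs.1 + 1, p.1) else cs)
    (0, 0)
  if cs.1 = 1 then
    pvBLoop (PySem.List.slice lines (some (cs.2 + 1)) none) []
  else []

-- ===== PRECONDITION & SPEC =====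
def Spec_section_bullets_py (lines : List String) (section_ : String) (out : List String) : Prop := out = section_bullets_py_alt lines section_
instance (lines : List String) (section_ : String) (out : List String) : Decidable (Spec_section_bullets_py lines section_ out) := by unfold Spec_section_bullets_py; infer_instance

-- ===== CLAIM (what is proved, stated in full; the proofs are below) =====
def Claim_equal_section_bullets_py : Prop := ∀ (lines : List String) (section_ : String), Dom_section_bullets_py lines section_ → Spec_section_bullets_py lines section_ (section_bullets_py lines section_)

-- ===== LEMMAS AND PROOFS =====

theorem pv_mem_findIdxs (lines : List String) (sec : String) (i : Int) :
    i ∈ pvFindSectionIndices lines sec ↔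
      ∃ (k : Nat) (h : k < lines.length), i = (k : Int) ∧ PySem.Str.strip lines[k] = sec := by
  unfold pvFindSectionIndices
  simp only [List.mem_filterMap, PySem.List.mem_enumerate_iff]
  constructor
  · rintro ⟨p, ⟨k, hk, rfl⟩, hp⟩
    simp only [zero_add] at hp
    by_cases hs : PySem.Str.strip lines[k] = sec
    · simp [hs] at hp; exact ⟨k, hk, by omega, hs⟩
    · simp [hs] at hp
  · rintro ⟨k, hk, rfl, hs⟩
    exact ⟨(0 + (k:Int), lines[k]), ⟨k, hk, rfl⟩, by simp [hs]⟩

theorem pv_inner_le_init (ids : List Int) (st e0 : Int) :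
    ids.foldl (fun e idx => if st < idx then min e idx else e) e0 ≤ e0 := by
  induction ids generalizing e0 with
  | nil => simp
  | cons a l ih =>
    simp only [List.foldl_cons]
    split
    · exact le_trans (ih _) (by omega)
    · exact ih _

theorem pv_inner_le_mem (ids : List Int) (st e0 i : Int) (hi : i ∈ ids) (hst : st < i) :
    ids.foldl (fun e idx => if st < idx then min e idx else e) e0 ≤ i := by
  induction ids generalizing e0 with
  | nil => simp at hi
  | cons a l ih =>
    simp only [List.foldl_cons]
    rcases List.mem_cons.mp hi with rfl | h
    · exact le_trans (pv_inner_le_init l st _) (by simp [hst])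
    · split <;> exact ih _ h

theorem pv_inner_lower (ids : List Int) (st e0 q : Int) (h0 : q ≤ e0)
    (h : ∀ i ∈ ids, st < i → q ≤ i) :
    q ≤ ids.foldl (fun e idx => if st < idx then min e idx else e) e0 := by
  induction ids generalizing e0 with
  | nil => simpa
  | cons a l ih =>
    simp only [List.foldl_cons]
    have ha := h a (by simp)
    refine ih _ ?_ (fun i hi hlt => h i (List.mem_cons_of_mem a hi) hlt)
    split
    · rename_i hlt; exact le_min h0 (ha hlt)
    · exact h0

theorem pv_outer_le_init (hs : List String) (lines : List String) (sec : String) (st e0 : Int) :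
    hs.foldl (fun e other => if other = sec then e
        else (pvFindSectionIndices lines other).foldl (fun e idx => if st < idx then min e idx else e) e)
      e0 ≤ e0 := by
  induction hs generalizing e0 with
  | nil => simp
  | cons a l ih =>
    simp only [List.foldl_cons]
    split
    · exact ih _
    · exact le_trans (ih _) (pv_inner_le_init _ _ _)

theorem pv_outer_le_mem (hs : List String) (lines : List String) (sec : String) (st e0 i : Int)
    (other : String) (hmem : other ∈ hs) (hne : other ≠ sec)
    (hidx : i ∈ pvFindSectionIndices lines other) (hst : st < i) :
    hs.foldl (fun e other => if other = sec then e
        else (pvFindSectionIndices lines other).foldl (fun e idx => if st < idx then min e idx else e) e)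
      e0 ≤ i := by
  induction hs generalizing e0 with
  | nil => simp at hmem
  | cons a l ih =>
    simp only [List.foldl_cons]
    rcases List.mem_cons.mp hmem with rfl | h
    · simp only [if_neg hne]
      exact le_trans (pv_outer_le_init l lines sec st _) (pv_inner_le_mem _ _ _ _ hidx hst)
    · split <;> exact ih _ h

theorem pv_outer_lower (hs : List String) (lines : List String) (sec : String) (st e0 q : Int)
    (h0 : q ≤ e0)
    (h : ∀ other ∈ hs, other ≠ sec → ∀ i ∈ pvFindSectionIndices lines other, st < i → q ≤ i) :
    q ≤ hs.foldl (fun e other => if other = sec then e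
        else (pvFindSectionIndices lines other).foldl (fun e idx => if st < idx then min e idx else e) e)
      e0 := by
  induction hs generalizing e0 with
  | nil => simpa
  | cons a l ih =>
    simp only [List.foldl_cons]
    refine ih _ ?_ (fun o ho hne i hi hlt => h o (List.mem_cons_of_mem a ho) hne i hi hlt)
    split
    · exact h0
    · rename_i hne
      exact pv_inner_lower _ _ _ _ h0 (h a (by simp) hne)

theorem pv_foldPairs (J : List Int) (c0 st0 : Int) :
    J.foldl (fun (cs : Int × Int) i => (cs.1 + 1, i)) (c0, st0) = (c0 + J.length, J.getLastD st0) := by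
  induction J generalizing c0 st0 with
  | nil => simp
  | cons a l ih =>
    simp only [List.foldl_cons, ih]
    cases l with
    | nil => simp
    | cons b m =>
      simp only [List.length_cons, List.getLastD_cons]
      refine Prod.ext ?_ rfl
      push_cast
      omega

theorem pv_foldB_eq (lines : List String) (sec : String) (s c0 st0 : Int) :
    (PySem.List.enumerate lines s).foldl
      (fun (cs : Int × Int) p => if PySem.Str.strip p.2 = sec then (cs.1 + 1, p.1) else cs) (c0, st0)
    = ((PySem.List.enumerate lines s).filterMap
        (fun p => if PySem.Str.strip p.2 = sec then some p.1 else none)).foldl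
        (fun (cs : Int × Int) i => (cs.1 + 1, i)) (c0, st0) := by
  induction lines generalizing s c0 st0 with
  | nil => simp [PySem.List.enumerate_nil]
  | cons a l ih =>
    rw [PySem.List.enumerate_cons]
    by_cases hs : PySem.Str.strip a = sec
    · simp only [List.filterMap_cons, List.foldl_cons, hs]
      exact ih _ _ _
    · simp only [List.filterMap_cons, List.foldl_cons, if_neg hs]
      exact ih _ _ _

theorem pv_bLoop_eq_fold (l : List String) (acc : List String) :
    pvBLoop l acc =
      (l.take (l.findIdx (fun r => decide (PySem.Str.strip r ∈ pvHeaders)))).foldl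
        (fun acc raw =>
          let stripped := PySem.Str.strip raw
          if stripped = "" then acc
          else if PySem.Str.startswith stripped "-" then acc ++ [stripped] else acc) acc := by
  induction l generalizing acc with
  | nil => simp [pvBLoop]
  | cons raw rest ih =>
    rw [List.findIdx_cons]
    by_cases hh : PySem.Str.strip raw ∈ pvHeaders
    · simp [pvBLoop, hh]
    · simp only [hh, decide_false, cond_false, List.take_succ_cons, List.foldl_cons]
      rw [pvBLoop, if_neg hh, ih]
      congr 1
      by_cases he : PySem.Str.strip raw = ""
      · rw [he]
        simp [show PySem.Chars.startswith [] ['-'] = false from by decide]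
      · simp [he]

-- ===== VERDICT (by name: the statement is the Claim_ definition above) =====
theorem section_bullets_py_spec : Claim_equal_section_bullets_py := by
  intro lines section_ _
  unfold Spec_section_bullets_py
  unfold section_bullets_py section_bullets_py_alt pvSectionBounds
  rw [pv_foldB_eq lines section_ 0 0 0]
  rw [show ((PySem.List.enumerate lines 0).filterMap
      (fun p => if PySem.Str.strip p.2 = section_ then some p.1 else none))
      = pvFindSectionIndices lines section_ from rfl]
  rw [pv_foldPairs]
  rcases hJ : pvFindSectionIndices lines section_ with _ | ⟨st, _ | ⟨b, t⟩⟩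
  · simp
  · -- unique index
    dsimp only
    have hmem : st ∈ pvFindSectionIndices lines section_ := by rw [hJ]; simp
    obtain ⟨k, hk, rfl, hsec⟩ := (pv_mem_findIdxs lines section_ st).mp hmem
    have huniq : ∀ (j : Nat) (hj : j < lines.length),
        PySem.Str.strip lines[j] = section_ → j = k := by
      intro j hj hs
      have : (j : Int) ∈ pvFindSectionIndices lines section_ :=
        (pv_mem_findIdxs lines section_ _).mpr ⟨j, hj, rfl, hs⟩
      rw [hJ] at this; simp at this; omega
    set suffix := lines.drop (k + 1) with hsuf
    set m := suffix.findIdx (fun r => decide (PySem.Str.strip r ∈ pvHeaders)) with hm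
    have hmlen : m ≤ suffix.length := List.findIdx_le_length
    have hsuflen : suffix.length = lines.length - (k + 1) := by simp [hsuf]
    have hsufget : ∀ (j : Nat) (hj : j < suffix.length),
        suffix[j] = lines[k + 1 + j]'(by omega) := by
      intro j hj; simp [hsuf, List.getElem_drop]
    -- the computed end equals k+1+m
    have he : pvHeaders.foldl
        (fun e other =>
          if other = section_ then e
          else (pvFindSectionIndices lines other).foldl
            (fun e idx => if (k : Int) < idx then min e idx else e) e)
        (lines.length : Int) = ((k + 1 + m : Nat) : Int) := by
      have hql : ((k + 1 + m : Nat) : Int) ≤ (lines.length : Int) := by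
        push_cast; omega
      apply le_antisymm
      · rcases lt_or_eq_of_le hmlen with hlt | heq
        · have hp := List.findIdx_getElem (p := fun r => decide (PySem.Str.strip r ∈ pvHeaders))
            (xs := suffix) (w := hlt)
          rw [hsufget m hlt] at hp
          simp only [decide_eq_true_eq] at hp
          have hne : PySem.Str.strip (lines[k + 1 + m]'(by omega)) ≠ section_ := by
            intro hcon
            have := huniq (k + 1 + m) (by omega) hcon
            omega
          exact pv_outer_le_mem pvHeaders lines section_ k _ _ _ hp hne
            ((pv_mem_findIdxs lines _ _).mpr ⟨k + 1 + m, by omega, rfl, rfl⟩)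
            (by push_cast; omega)
        · rw [show ((k + 1 + m : Nat) : Int) = (lines.length : Int) by push_cast; omega]
          exact pv_outer_le_init _ _ _ _ _
      · apply pv_outer_lower _ _ _ _ _ _ hql
        intro other _ hne i hi hst
        obtain ⟨j, hj, rfl, hsj⟩ := (pv_mem_findIdxs lines other i).mp hi
        have hjk : k + 1 ≤ j := by omega
        have ht : j - (k + 1) < suffix.length := by omega
        have hsg : suffix[j - (k+1)]'ht = lines[j]'hj := by
          simp only [hsuf, List.getElem_drop]
          congr 1
          omega
        have hhdr : (fun r => decide (PySem.Str.strip r ∈ pvHeaders)) (suffix[j - (k+1)]'ht) = true := by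
          simp only [decide_eq_true_eq]
          rw [hsg, hsj]
          exact ‹other ∈ pvHeaders›
        have hmin : m ≤ j - (k + 1) := by
          by_contra hc
          exact absurd hhdr (by simpa using List.not_of_lt_findIdx (by omega : j - (k+1) < m))
        push_cast; omega
    have hslice1 : PySem.List.slice lines (some ((k : Int) + 1)) (some ((k + 1 + m : Nat) : Int))
        = suffix.take m := by
      rw [show ((k : Int) + 1) = ((k + 1 : Nat) : Int) by push_cast; ring]
      rw [PySem.List.slice_natCast]
      congr 1
      omega
    rw [he, hslice1]
    rw [if_pos (by norm_num)]
    rw [show PySem.List.slice lines (some (([(k:Int)].getLastD 0) + 1)) none = suffix from by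
      rw [show (([(k:Int)].getLastD 0) + 1) = ((k + 1 : Nat) : Int) by simp]
      exact PySem.List.slice_from_natCast lines (k+1)]
    rw [pv_bLoop_eq_fold, ← hm]
  · dsimp only
    rw [if_neg (by push_cast [List.length_cons]; omega)]
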